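-- pv_equiv track=rewrite | github.com/bcgsc/ntSynt | visualization_scripts/gggenomes_sort_sequences.py | get_chrom_orders
-- ===== SOURCE A (Python) =====
-- import itertools
--
-- def get_chrom_orders(tile_list):
--     "Given the tile list for a given assembly, return the chromosome orders"
--     collapsed_list = []
--     for chrom, group in itertools.groupby(tile_list, key=lambda x: x[0]):
--         total = sum(c[1] for c in group)
--         collapsed_list.append((chrom, total))
--     seq_order = []
--     max_indexes = {} # chrom -> (max_index, max_val)
--     for i, tup in enumerate(collapsed_list):
--         chrom, length = tup
--         if chrom not in max_indexes or length > max_indexes[chrom][1]: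
--             max_indexes[chrom] = (i, length)
--     seq_order = [tile_tup[0] for i, tile_tup in enumerate(collapsed_list) if max_indexes[tile_tup[0]][0] == i]
--     seq_order = {chrom: i for i, chrom in enumerate(seq_order)}
--     return seq_order
-- ===== SOURCE B (Python) =====
-- def get_chrom_orders(tile_list):
--     "Given the tile list for a given assembly, return the chromosome orders"
--     collapsed = []
--     for chrom, length in tile_list:
--         if collapsed and collapsed[-1][0] == chrom:
--             collapsed[-1] = (chrom, collapsed[-1][1] + length)
--         else:
--             collapsed.append((chrom, length))
--     best = {}
--     order = []
--     for chrom, total in collapsed: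
--         if chrom not in best:
--             best[chrom] = total
--             order.append(chrom)
--         elif total > best[chrom]:
--             best[chrom] = total
--             order.remove(chrom)
--             order.append(chrom)
--     return {chrom: rank for rank, chrom in enumerate(order)}
-- ===== Notes on version B (the rewrite author's own statement) =====
-- stated objective: simpler
-- what changed: A records a first-max index per chromosome in a dict and then re-scans the collapsed list filtering by stored position; B collapses adjacent runs with a last-element merge (no itertools.groupby) and maintains the final order directly in one pass, moving a chromosome to the end of the order list exactly when a strictly larger collapsed total appears.
import Mathlib
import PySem

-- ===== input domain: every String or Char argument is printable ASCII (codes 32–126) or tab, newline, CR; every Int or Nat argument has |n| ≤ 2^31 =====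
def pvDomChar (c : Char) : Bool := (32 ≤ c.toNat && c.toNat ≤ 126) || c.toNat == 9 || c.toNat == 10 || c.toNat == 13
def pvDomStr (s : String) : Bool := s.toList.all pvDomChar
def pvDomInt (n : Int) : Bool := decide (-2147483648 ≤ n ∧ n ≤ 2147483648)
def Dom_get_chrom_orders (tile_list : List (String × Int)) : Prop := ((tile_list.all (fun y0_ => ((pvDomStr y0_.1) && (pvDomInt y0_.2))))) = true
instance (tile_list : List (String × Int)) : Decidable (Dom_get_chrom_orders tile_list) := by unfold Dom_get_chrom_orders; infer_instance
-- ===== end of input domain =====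

-- B replaces A's "record first max index per chrom, then re-scan and filter by position" with a
-- single pass that maintains the order list directly (move a chrom to the end when a strictly
-- larger collapsed total appears); objective: simpler, same cost.

-- ===== PORT A =====
-- itertools.groupby(tile_list, key=x[0]) with sum over each group (A's first loop)
def pvCollapseA : List (String × Int) → List (String × Int)
  | [] => []
  | x :: rest =>
      (x.1, x.2 + ((rest.takeWhile (fun p => p.1 == x.1)).map Prod.snd).sum) ::
        pvCollapseA (rest.dropWhile (fun p => p.1 == x.1))
  termination_by xs => xs.length
  decreasing_by
    simpa using Nat.lt_succ_of_le (List.length_dropWhile_le _ _)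

-- one step of A's max_indexes loop ('chrom not in max_indexes or length > max_indexes[chrom][1]')
def pvStepA (d : PySem.Dict String (Int × Int)) (p : Int × (String × Int)) :
    PySem.Dict String (Int × Int) :=
  match d.get? p.2.1 with
  | none => d.insert p.2.1 (p.1, p.2.2)
  | some mv => if p.2.2 > mv.2 then d.insert p.2.1 (p.1, p.2.2) else d

def pvMaxIdx (L : List (String × Int)) : PySem.Dict String (Int × Int) :=
  (PySem.List.enumerate L 0).foldl pvStepA PySem.Dict.empty

-- A's comprehension '[tup[0] for i, tup in enumerate(collapsed) if max_indexes[tup[0]][0] == i]'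
-- (the key is always present; the getD default is never used)
def pvSeqA (D : PySem.Dict String (Int × Int)) (L : List (String × Int)) : List String :=
  ((PySem.List.enumerate L 0).filter
      (fun p => (D.getD p.2.1 ((-1 : Int), (0 : Int))).1 == p.1)).map (fun p => p.2.1)

-- the final dict comprehension '{chrom: i for i, chrom in enumerate(seq_order)}'
-- (this literal line is shared by both Python programs, so the helper is shared)
def pvRanks (seq : List String) : List (String × Int) :=
  ((PySem.List.enumerate seq 0).foldl (fun d p => d.insert p.2 p.1)
      (PySem.Dict.empty : PySem.Dict String Int)).items

def get_chrom_orders (tile_list : List (String × Int)) : List (String × Int) :=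
  pvRanks (pvSeqA (pvMaxIdx (pvCollapseA tile_list)) (pvCollapseA tile_list))

-- ===== PORT B =====
-- B's collapse loop: merge into the last open group instead of itertools.groupby
def pvMergeB (acc : List (String × Int)) (p : String × Int) : List (String × Int) :=
  match acc.getLast? with
  | some q => if q.1 == p.1 then acc.dropLast ++ [(p.1, q.2 + p.2)] else acc ++ [p]
  | none => acc ++ [p]

-- B's single order-maintenance pass: best dict + move-to-end order list
def pvStepB (s : PySem.Dict String Int × List String) (p : String × Int) :
    PySem.Dict String Int × List String :=
  match s.1.get? p.1 with
  | none => (s.1.insert p.1 p.2, s.2 ++ [p.1])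
  | some b =>
      if p.2 > b then (s.1.insert p.1 p.2, ((PySem.List.remove? s.2 p.1).getD s.2) ++ [p.1])
      else s

def get_chrom_orders_alt (tile_list : List (String × Int)) : List (String × Int) :=
  pvRanks (((tile_list.foldl pvMergeB []).foldl pvStepB (PySem.Dict.empty, [])).2)

-- ===== PRECONDITION & SPEC =====
def Spec_get_chrom_orders (tile_list : List (String × Int)) (out : List (String × Int)) : Prop := out = get_chrom_orders_alt tile_list
instance (tile_list : List (String × Int)) (out : List (String × Int)) : Decidable (Spec_get_chrom_orders tile_list out) := by unfold Spec_get_chrom_orders; infer_instance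

-- ===== CLAIM (what is proved, stated in full; the proofs are below) =====
def Claim_equal_get_chrom_orders : Prop := ∀ (tile_list : List (String × Int)), Dom_get_chrom_orders tile_list → Spec_get_chrom_orders tile_list (get_chrom_orders tile_list)

-- ===== LEMMAS AND PROOFS =====

-- ---- collapse: B's last-group merge equals A's groupby recursion ----

theorem pvCollapseA_ne_nil (l : List (String × Int)) (h : l ≠ []) : pvCollapseA l ≠ [] := by
  cases l with
  | nil => exact absurd rfl h
  | cons x rest => rw [pvCollapseA]; simp

theorem pvMergeB_cons (q : String × Int) (l : List (String × Int)) (p : String × Int)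
    (hl : l ≠ []) : pvMergeB (q :: l) p = q :: pvMergeB l p := by
  unfold pvMergeB
  have hcons : (q :: l).getLast? = l.getLast? := by
    cases l with
    | nil => exact absurd rfl hl
    | cons a t => simp [List.getLast?_cons]
  rw [hcons]
  cases hg : l.getLast? with
  | none => exact absurd (List.getLast?_eq_none_iff.mp hg) hl
  | some r =>
    by_cases h : (r.1 == p.1) = true
    · simp [h, List.dropLast_cons_of_ne_nil hl]
    · simp [h]

theorem pvCollapseA_snoc (ys : List (String × Int)) (p : String × Int) :
    pvCollapseA (ys ++ [p]) = pvMergeB (pvCollapseA ys) p := by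
  induction ys using pvCollapseA.induct with
  | case1 => simp [pvCollapseA, pvMergeB]
  | case2 x rest ih =>
    have hsplit : rest.takeWhile (fun q => q.1 == x.1) ++ rest.dropWhile (fun q => q.1 == x.1)
        = rest := List.takeWhile_append_dropWhile
    rw [List.cons_append]
    conv_lhs => rw [pvCollapseA]
    conv_rhs => rw [pvCollapseA]
    by_cases hd : rest.dropWhile (fun q => q.1 == x.1) = []
    · have ht : rest.takeWhile (fun q => q.1 == x.1) = rest := by
        rw [hd, List.append_nil] at hsplit; exact hsplit
      rw [hd]
      rw [List.takeWhile_append, List.dropWhile_append]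
      simp only [ht, if_true]
      by_cases hp : (p.1 == x.1) = true
      · have hpe : p.1 = x.1 := by simpa using hp
        simp [pvCollapseA, pvMergeB, List.takeWhile, List.dropWhile, hd, hpe, add_assoc]
      · simp [pvCollapseA, pvMergeB, List.takeWhile, List.dropWhile, hp, hd,
          (by simpa [eq_comm] using
            (beq_eq_false_iff_ne (a := p.1) (b := x.1)).mp (by simpa using hp) : x.1 ≠ p.1)]
    · have hlen : (rest.takeWhile (fun q => q.1 == x.1)).length ≠ rest.length := by
        have := congrArg List.length hsplit
        simp only [List.length_append] at this
        have : (rest.dropWhile (fun q => q.1 == x.1)).length ≠ 0 := by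
          simpa [List.length_eq_zero_iff] using hd
        omega
      rw [List.takeWhile_append, List.dropWhile_append]
      simp only [if_neg hlen, List.isEmpty_iff, if_neg hd]
      rw [ih, pvMergeB_cons _ _ _ (pvCollapseA_ne_nil _ hd)]

theorem pvCollapse_eq_gen (xs ys : List (String × Int)) :
    xs.foldl pvMergeB (pvCollapseA ys) = pvCollapseA (ys ++ xs) := by
  induction xs generalizing ys with
  | nil => simp
  | cons x t ih =>
    rw [List.foldl_cons, ← pvCollapseA_snoc, ih (ys ++ [x]), List.append_assoc,
      List.singleton_append]

theorem pvCollapse_eq (xs : List (String × Int)) :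
    xs.foldl pvMergeB [] = pvCollapseA xs := by
  have h := pvCollapse_eq_gen xs []
  simpa [pvCollapseA] using h

-- ---- the order pass: B's move-to-end list equals A's positional filter ----

def pvInv (L : List (String × Int)) : Prop :=
  (∀ c, ((pvMaxIdx L).get? c).map Prod.snd = (L.foldl pvStepB (PySem.Dict.empty, [])).1.get? c) ∧
  (∀ c i w, (pvMaxIdx L).get? c = some (i, w) →
      ∃ k : Nat, i = (k : Int) ∧ ∃ x, L[k]? = some x ∧ x.1 = c) ∧
  (∀ c, (pvMaxIdx L).get? c = none → ∀ x ∈ L, x.1 ≠ c) ∧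
  (L.foldl pvStepB (PySem.Dict.empty, [])).2 = pvSeqA (pvMaxIdx L) L

theorem pvSeqA_nodup (D : PySem.Dict String (Int × Int)) (L : List (String × Int)) :
    (pvSeqA D L).Nodup := by
  unfold pvSeqA
  rw [List.Nodup, List.pairwise_map]
  refine List.Pairwise.imp_of_mem ?_
    ((PySem.List.pairwise_lt_enumerate (xs := L) (s := 0)).filter _)
  intro a b ha hb hlt heq
  have hpa := List.of_mem_filter ha
  have hpb := List.of_mem_filter hb
  simp only [beq_iff_eq] at hpa hpb
  rw [heq] at hpa
  rw [hpa] at hpb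
  omega

theorem pvMem_seqA (L : List (String × Int)) (c : String) (i w : Int)
    (h : (pvMaxIdx L).get? c = some (i, w))
    (h2 : ∃ k : Nat, i = (k : Int) ∧ ∃ x, L[k]? = some x ∧ x.1 = c) :
    c ∈ pvSeqA (pvMaxIdx L) L := by
  obtain ⟨k, hik, x, hx, hxc⟩ := h2
  obtain ⟨hk, hxv⟩ := List.getElem?_eq_some_iff.mp hx
  unfold pvSeqA
  refine List.mem_map.mpr ⟨((k : Int), x), List.mem_filter.mpr ⟨?_, ?_⟩, hxc⟩
  · exact (PySem.List.mem_enumerate_iff L 0 _).mpr ⟨k, hk, by simp [hxv]⟩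
  · simp only [hxc]
    rw [PySem.Dict.getD_of_get?_eq_some _ _ h]
    simp [← hik]

theorem pvMaxIdx_snoc (L : List (String × Int)) (x : String × Int) :
    pvMaxIdx (L ++ [x]) = pvStepA (pvMaxIdx L) ((L.length : Int), x) := by
  unfold pvMaxIdx
  rw [PySem.List.enumerate_append, List.foldl_append]
  simp [PySem.List.enumerate_cons, PySem.List.enumerate_nil]

theorem pvEnum_snoc (L : List (String × Int)) (x : String × Int) :
    PySem.List.enumerate (L ++ [x]) 0
      = PySem.List.enumerate L 0 ++ [((L.length : Int), x)] := by
  rw [PySem.List.enumerate_append]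
  simp [PySem.List.enumerate_cons, PySem.List.enumerate_nil]

theorem pvInv_all (L : List (String × Int)) : pvInv L := by
  induction L using List.reverseRecOn with
  | nil =>
    refine ⟨?_, ?_, ?_, ?_⟩ <;>
      simp [pvMaxIdx, pvSeqA, PySem.List.enumerate_nil, PySem.Dict.get?_empty]
  | append_singleton L x ih =>
    obtain ⟨I1, I2, K, I3⟩ := ih
    have hSB : (L ++ [x]).foldl pvStepB (PySem.Dict.empty, []) =
        pvStepB (L.foldl pvStepB (PySem.Dict.empty, [])) x := by
      rw [List.foldl_append, List.foldl_cons, List.foldl_nil]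
    cases hc : (pvMaxIdx L).get? x.1 with
    | none =>
      have hs1 : (L.foldl pvStepB (PySem.Dict.empty, [])).1.get? x.1 = none := by
        rw [← I1 x.1, hc]; rfl
      have hD' : pvMaxIdx (L ++ [x]) = (pvMaxIdx L).insert x.1 ((L.length : Int), x.2) := by
        rw [pvMaxIdx_snoc]; simp [pvStepA, hc]
      have hs' : (L ++ [x]).foldl pvStepB (PySem.Dict.empty, []) =
          ((L.foldl pvStepB (PySem.Dict.empty, [])).1.insert x.1 x.2,
            (L.foldl pvStepB (PySem.Dict.empty, [])).2 ++ [x.1]) := by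
        rw [hSB]; simp [pvStepB, hs1]
      refine ⟨?_, ?_, ?_, ?_⟩
      · intro c
        rw [hD', hs']
        by_cases hcx : c = x.1
        · subst hcx
          rw [PySem.Dict.get?_insert_self, PySem.Dict.get?_insert_self]; rfl
        · rw [PySem.Dict.get?_insert_of_ne _ _ hcx, PySem.Dict.get?_insert_of_ne _ _ hcx]
          exact I1 c
      · intro c i w hg
        rw [hD'] at hg
        by_cases hcx : c = x.1
        · subst hcx
          rw [PySem.Dict.get?_insert_self] at hg
          obtain ⟨hi, hw⟩ := Prod.mk.injEq .. ▸ (Option.some.injEq .. ▸ hg)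
          exact ⟨L.length, hi ▸ rfl, x, List.getElem?_concat_length, rfl⟩
        · rw [PySem.Dict.get?_insert_of_ne _ _ hcx] at hg
          obtain ⟨k, hik, y, hy, hyc⟩ := I2 c i w hg
          have hk : k < L.length := (List.getElem?_eq_some_iff.mp hy).1
          exact ⟨k, hik, y, by rw [List.getElem?_append_left hk]; exact hy, hyc⟩
      · intro c hg y hy
        rw [hD'] at hg
        by_cases hcx : c = x.1
        · subst hcx; rw [PySem.Dict.get?_insert_self] at hg; exact absurd hg (by simp)
        · rw [PySem.Dict.get?_insert_of_ne _ _ hcx] at hg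
          rcases List.mem_append.mp hy with h | h
          · exact K c hg y h
          · rw [List.mem_singleton.mp h]; exact fun he => hcx he.symm
      · rw [hs', hD']
        unfold pvSeqA
        rw [pvEnum_snoc, List.filter_append, List.map_append]
        have hnew : List.filter
            (fun p => (((pvMaxIdx L).insert x.1 ((L.length : Int), x.2)).getD p.2.1
              ((-1 : Int), (0 : Int))).1 == p.1) [((L.length : Int), x)]
            = [((L.length : Int), x)] := by
          simp [PySem.Dict.getD_insert_self]
        have hold : List.filter
            (fun p => (((pvMaxIdx L).insert x.1 ((L.length : Int), x.2)).getD p.2.1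
              ((-1 : Int), (0 : Int))).1 == p.1) (PySem.List.enumerate L 0)
            = List.filter
            (fun p => ((pvMaxIdx L).getD p.2.1 ((-1 : Int), (0 : Int))).1 == p.1)
            (PySem.List.enumerate L 0) := by
          apply List.filter_congr
          intro p hp
          obtain ⟨k, hk, hpk⟩ := (PySem.List.mem_enumerate_iff L 0 p).mp hp
          have hpc : p.2.1 ≠ x.1 := by
            rw [hpk]
            exact fun he => (K x.1 hc L[k] (List.getElem_mem hk)) he
          rw [PySem.Dict.getD_insert_of_ne _ _ _ hpc]
        rw [hnew, hold, I3]
        simp [pvSeqA]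
    | some iw =>
      have hs1 : (L.foldl pvStepB (PySem.Dict.empty, [])).1.get? x.1 = some iw.2 := by
        rw [← I1 x.1, hc]; rfl
      obtain ⟨k0, hik0, y0, hy0, hy0c⟩ := I2 x.1 iw.1 iw.2 (by rw [hc])
      have hk0 : k0 < L.length := (List.getElem?_eq_some_iff.mp hy0).1
      by_cases hgt : x.2 > iw.2
      · have hD' : pvMaxIdx (L ++ [x]) = (pvMaxIdx L).insert x.1 ((L.length : Int), x.2) := by
          rw [pvMaxIdx_snoc]; simp [pvStepA, hc, hgt]
        have hmemx : x.1 ∈ (L.foldl pvStepB (PySem.Dict.empty, [])).2 := by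
          rw [I3]
          exact pvMem_seqA L x.1 iw.1 iw.2 (by rw [hc]) ⟨k0, hik0, y0, hy0, hy0c⟩
        have hnd : (L.foldl pvStepB (PySem.Dict.empty, [])).2.Nodup := by
          rw [I3]; exact pvSeqA_nodup _ _
        have hs' : (L ++ [x]).foldl pvStepB (PySem.Dict.empty, []) =
            ((L.foldl pvStepB (PySem.Dict.empty, [])).1.insert x.1 x.2,
              (L.foldl pvStepB (PySem.Dict.empty, [])).2.filter (fun y => y != x.1) ++ [x.1]) := by
          rw [hSB]
          simp only [pvStepB, hs1, hgt, if_pos]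
          rw [PySem.List.remove?_eq_some_erase _ _ hmemx]
          rw [List.Nodup.erase_eq_filter hnd]
          rfl
        refine ⟨?_, ?_, ?_, ?_⟩
        · intro c
          rw [hD', hs']
          by_cases hcx : c = x.1
          · subst hcx
            rw [PySem.Dict.get?_insert_self, PySem.Dict.get?_insert_self]; rfl
          · rw [PySem.Dict.get?_insert_of_ne _ _ hcx, PySem.Dict.get?_insert_of_ne _ _ hcx]
            exact I1 c
        · intro c i w hg
          rw [hD'] at hg
          by_cases hcx : c = x.1
          · subst hcx
            rw [PySem.Dict.get?_insert_self] at hg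
            obtain ⟨hi, hw⟩ := Prod.mk.injEq .. ▸ (Option.some.injEq .. ▸ hg)
            exact ⟨L.length, hi ▸ rfl, x, List.getElem?_concat_length, rfl⟩
          · rw [PySem.Dict.get?_insert_of_ne _ _ hcx] at hg
            obtain ⟨k, hik, y, hy, hyc⟩ := I2 c i w hg
            have hk : k < L.length := (List.getElem?_eq_some_iff.mp hy).1
            exact ⟨k, hik, y, by rw [List.getElem?_append_left hk]; exact hy, hyc⟩
        · intro c hg y hy
          rw [hD'] at hg
          by_cases hcx : c = x.1
          · subst hcx; rw [PySem.Dict.get?_insert_self] at hg; exact absurd hg (by simp)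
          · rw [PySem.Dict.get?_insert_of_ne _ _ hcx] at hg
            rcases List.mem_append.mp hy with h | h
            · exact K c hg y h
            · rw [List.mem_singleton.mp h]; exact fun he => hcx he.symm
        · rw [hs', hD']
          unfold pvSeqA
          rw [pvEnum_snoc, List.filter_append, List.map_append]
          have hnew : List.filter
              (fun p => (((pvMaxIdx L).insert x.1 ((L.length : Int), x.2)).getD p.2.1
                ((-1 : Int), (0 : Int))).1 == p.1) [((L.length : Int), x)]
              = [((L.length : Int), x)] := by
            simp [PySem.Dict.getD_insert_self]
          have hold : List.filter
              (fun p => (((pvMaxIdx L).insert x.1 ((L.length : Int), x.2)).getD p.2.1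
                ((-1 : Int), (0 : Int))).1 == p.1) (PySem.List.enumerate L 0)
              = List.filter
              (fun p => (p.2.1 != x.1)
                && (((pvMaxIdx L).getD p.2.1 ((-1 : Int), (0 : Int))).1 == p.1))
              (PySem.List.enumerate L 0) := by
            apply List.filter_congr
            intro p hp
            obtain ⟨k, hk, hpk⟩ := (PySem.List.mem_enumerate_iff L 0 p).mp hp
            by_cases hpc : p.2.1 = x.1
            · rw [hpc, PySem.Dict.getD_insert_self]
              have h1 : (((L.length : Int), x.2).1 == p.1) = false := by
                rw [hpk]
                simp only [beq_eq_false_iff_ne]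
                intro he
                have : (L.length : Int) = 0 + (k : Int) := by exact_mod_cast he
                omega
              rw [h1]
              simp
            · rw [PySem.Dict.getD_insert_of_ne _ _ _ hpc]
              simp [hpc]
          rw [hnew, hold]
          have hfil : List.filter (fun y => y != x.1) (List.foldl pvStepB (PySem.Dict.empty, []) L).2
              = List.map (fun p => p.2.1)
                  (List.filter (fun p => (p.2.1 != x.1)
                    && (((pvMaxIdx L).getD p.2.1 ((-1 : Int), (0 : Int))).1 == p.1))
                    (PySem.List.enumerate L 0)) := by
            rw [I3]
            unfold pvSeqA
            rw [List.filter_map, List.filter_filter]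
            rfl
          simp only [List.map_cons, List.map_nil]
          exact congrArg (· ++ [x.1]) hfil
      · have hD' : pvMaxIdx (L ++ [x]) = pvMaxIdx L := by
          rw [pvMaxIdx_snoc]; simp [pvStepA, hc, hgt]
        have hs' : (L ++ [x]).foldl pvStepB (PySem.Dict.empty, []) =
            L.foldl pvStepB (PySem.Dict.empty, []) := by
          rw [hSB]; simp [pvStepB, hs1, hgt]
        refine ⟨?_, ?_, ?_, ?_⟩
        · intro c; rw [hD', hs']; exact I1 c
        · intro c i w hg
          rw [hD'] at hg
          obtain ⟨k, hik, y, hy, hyc⟩ := I2 c i w hg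
          have hk : k < L.length := (List.getElem?_eq_some_iff.mp hy).1
          exact ⟨k, hik, y, by rw [List.getElem?_append_left hk]; exact hy, hyc⟩
        · intro c hg y hy
          rw [hD'] at hg
          rcases List.mem_append.mp hy with h | h
          · exact K c hg y h
          · rw [List.mem_singleton.mp h]
            intro he
            rw [he, hg] at hc
            cases hc
        · rw [hs', hD']
          unfold pvSeqA
          rw [pvEnum_snoc, List.filter_append, List.map_append]
          have hnew : List.filter
              (fun p => ((pvMaxIdx L).getD p.2.1 ((-1 : Int), (0 : Int))).1 == p.1)
              [((L.length : Int), x)] = [] := by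
            have hgd : (pvMaxIdx L).getD x.1 ((-1 : Int), (0 : Int)) = iw :=
              PySem.Dict.getD_of_get?_eq_some _ _ hc
            simp only [List.filter, hgd]
            have : (iw.1 == (L.length : Int)) = false := by
              simp only [beq_eq_false_iff_ne]
              rw [hik0]
              intro he
              have : k0 = L.length := by exact_mod_cast he
              omega
            simp [this]
          rw [hnew, I3]
          simp [pvSeqA]

-- ===== VERDICT (by name: the statement is the Claim_ definition above) =====
theorem get_chrom_orders_spec : Claim_equal_get_chrom_orders := by
  intro tile_list _
  unfold Spec_get_chrom_orders get_chrom_orders get_chrom_orders_alt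
  rw [pvCollapse_eq, (pvInv_all (pvCollapseA tile_list)).2.2.2]
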